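-- pv_equiv track=rewrite | github.com/fnbgi/cellbin2 | test/utils/file_compare.py | categories_diff
-- ===== SOURCE A (Python) =====
-- def categories_diff(value_diffs):
--     categories = ["TissueSeg", "ImageInfo", "CellSeg", "QCInfo", "Stitch", "Register"]
--     cat_map = {c: [] for c in categories}
--     cat_map["Others"] = []
--
--     for diff in value_diffs:
--         if diff.startswith("[") and "]" in diff:
--             path_part = diff[1: diff.index("]")]
--         else:
--             path_part = diff
--
--         split_path = path_part.split(".")
--         if len(split_path) > 1 and split_path[1] in categories:
--             cat_map[split_path[1]].append(diff)
--         else: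
--             cat_map["Others"].append(diff)
--     return cat_map
-- ===== SOURCE B (Python) =====
-- CATEGORIES = ["TissueSeg", "ImageInfo", "CellSeg", "QCInfo", "Stitch", "Register"]
--
--
-- def category_of(diff):
--     s = diff
--     if s.startswith("[") and "]" in s:
--         s = s[1:s.index("]")]
--     parts = s.split(".")
--     if len(parts) > 1 and parts[1] in CATEGORIES:
--         return parts[1]
--     return "Others"
--
--
-- def categories_diff(value_diffs):
--     return {c: [d for d in value_diffs if category_of(d) == c]
--             for c in CATEGORIES + ["Others"]}
-- ===== Notes on version B (the rewrite author's own statement) =====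
-- stated objective: simpler
-- what changed: Replaces the single append-bucketing pass over a mutable dict with a category_of helper plus one filtering comprehension per fixed category key (group-by-predicate), with no mutation at all.
import Mathlib
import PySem

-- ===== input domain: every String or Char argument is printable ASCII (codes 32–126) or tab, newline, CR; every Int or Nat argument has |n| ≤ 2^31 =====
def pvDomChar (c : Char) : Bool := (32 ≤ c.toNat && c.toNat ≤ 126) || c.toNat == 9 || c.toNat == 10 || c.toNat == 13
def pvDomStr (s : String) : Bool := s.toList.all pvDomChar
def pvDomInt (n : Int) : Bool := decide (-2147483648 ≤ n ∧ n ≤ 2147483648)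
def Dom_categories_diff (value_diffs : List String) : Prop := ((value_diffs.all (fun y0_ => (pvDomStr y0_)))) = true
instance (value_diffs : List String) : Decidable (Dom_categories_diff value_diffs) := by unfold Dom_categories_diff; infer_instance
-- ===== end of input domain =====

-- B replaces A's single mutating bucketing pass with a category_of helper and one filter per fixed category key (simpler decomposition, no mutation); the returned dict (assoc list) is identical.

-- ===== PORT A =====
-- literal transliteration of A: build the dict by appending to buckets while iterating value_diffs
def categories_diff (value_diffs : List String) : List (String × List String) :=
  let categories : List String := ["TissueSeg", "ImageInfo", "CellSeg", "QCInfo", "Stitch", "Register"]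
  let init : PySem.Dict String (List String) :=
    (categories.foldl (fun d c => d.insert c []) PySem.Dict.empty).insert "Others" []
  (value_diffs.foldl (fun d diff =>
    let path_part :=
      if PySem.Str.startswith diff "[" && PySem.Str.isIn "]" diff then
        -- diff.index("]") is guarded by '"]" in diff', so it equals Str.find here (never raises)
        PySem.Str.slice diff (some 1) (some (PySem.Str.find diff "]"))
      else diff
    -- sep "." is nonempty, so split? is always 'some'
    let split_path := (PySem.Str.split? path_part ".").getD []
    -- 'len(split_path) > 1 and split_path[1] in categories': pyGet? _ 1 is some ↔ length > 1
    match PySem.List.pyGet? split_path 1 with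
    | some s =>
        if categories.contains s then d.modify s [] (· ++ [diff])
        else d.modify "Others" [] (· ++ [diff])
    | none => d.modify "Others" [] (· ++ [diff])) init).items

-- ===== PORT B =====
def pvCategories : List String := ["TissueSeg", "ImageInfo", "CellSeg", "QCInfo", "Stitch", "Register"]

def category_of (diff : String) : String :=
  let s :=
    if PySem.Str.startswith diff "[" && PySem.Str.isIn "]" diff then
      PySem.Str.slice diff (some 1) (some (PySem.Str.find diff "]"))
    else diff
  let parts := (PySem.Str.split? s ".").getD []
  match PySem.List.pyGet? parts 1 with
  | some p => if pvCategories.contains p then p else "Others"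
  | none => "Others"

def categories_diff_alt (value_diffs : List String) : List (String × List String) :=
  (pvCategories ++ ["Others"]).map
    (fun c => (c, value_diffs.filter (fun d => category_of d == c)))

-- ===== PRECONDITION & SPEC =====
def Spec_categories_diff (value_diffs : List String) (out : List (String × List String)) : Prop := out = categories_diff_alt value_diffs
instance (value_diffs : List String) (out : List (String × List String)) : Decidable (Spec_categories_diff value_diffs out) := by unfold Spec_categories_diff; infer_instance

-- ===== CLAIM (what is proved, stated in full; the proofs are below) =====
def Claim_equal_categories_diff : Prop := ∀ (value_diffs : List String), Dom_categories_diff value_diffs → Spec_categories_diff value_diffs (categories_diff value_diffs)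

-- ===== LEMMAS AND PROOFS =====

-- the appending-modify loop over a dict whose keys cover the key function: items become per-key filters
theorem foldl_modify_items (key : String → String) :
    ∀ (xs : List String) (ps : List (String × List String)),
      (ps.map Prod.fst).Nodup → (∀ x, key x ∈ ps.map Prod.fst) →
      (xs.foldl (fun d x => PySem.Dict.modify d (key x) [] (· ++ [x]))
        (PySem.Dict.mk ps)).items
        = ps.map (fun p => (p.1, p.2 ++ xs.filter (fun x => key x == p.1))) := by
  intro xs
  induction xs with
  | nil =>
    intro ps _ _
    simp
  | cons x xs ih =>
    intro ps hnd hk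
    have hcont : (PySem.Dict.mk ps).contains (key x) = true := by
      simp only [PySem.Dict.contains, List.any_eq_true]
      obtain ⟨p, hp, he⟩ := List.mem_map.mp (hk x)
      exact ⟨p, hp, by simp [he]⟩
    have hstep : (PySem.Dict.modify (PySem.Dict.mk ps) (key x) [] (· ++ [x]))
        = PySem.Dict.mk
          (ps.map (fun p => if p.1 == key x then (p.1, p.2 ++ [x]) else p)) := by
      simp only [PySem.Dict.modify, PySem.Dict.insert, hcont, if_pos]
      apply PySem.Dict.ext
      apply List.map_congr_left
      intro p hp
      by_cases h : p.1 = key x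
      · have hgd : (PySem.Dict.mk ps).getD (key x) [] = p.2 := by
          simp only [PySem.Dict.getD, PySem.Dict.get?]
          have hfind : ps.find? (fun q => q.1 == key x) = some p := by
            apply List.find?_eq_some_iff_append.mpr
            constructor
            · simp [h]
            · obtain ⟨l₁, l₂, hsplit⟩ := List.append_of_mem hp
              refine ⟨l₁, l₂, hsplit, ?_⟩
              intro q hq
              have hnodup : (l₁.map Prod.fst ++ (p :: l₂).map Prod.fst).Nodup := by
                simpa [hsplit] using hnd
              have hdis := List.disjoint_of_nodup_append hnodup
              have hq' : q.1 ≠ key x := fun he =>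
                hdis (List.mem_map_of_mem hq) (by rw [he, ← h]; simp)
              simp [hq']
          simp [hfind]
        simp [h, hgd]
      · simp [h]
    have hkeys : (ps.map (fun p => if p.1 == key x then (p.1, p.2 ++ [x]) else p)).map Prod.fst
        = ps.map Prod.fst := by
      rw [List.map_map]
      apply List.map_congr_left
      intro p _
      by_cases h : p.1 = key x <;> simp [h]
    rw [List.foldl_cons, hstep,
      ih _ (by rw [hkeys]; exact hnd) (fun y => by rw [hkeys]; exact hk y),
      List.map_map]
    apply List.map_congr_left
    intro p _
    by_cases h : key x = p.1
    · simp [Function.comp, h]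
    · have h' : (p.1 == key x) = false := by simp [Ne.symm h]
      have h'' : (key x == p.1) = false := by simp [h]
      simp [Function.comp, h', h'']

-- the branch structure of A's step is 'modify at the key that category_of computes'
theorem match_step (d : PySem.Dict String (List String)) (diff : String) (o : Option String) :
    (match o with
     | some s =>
         if pvCategories.contains s then d.modify s [] (· ++ [diff])
         else d.modify "Others" [] (· ++ [diff])
     | none => d.modify "Others" [] (· ++ [diff]))
    = d.modify (match o with
        | some p => if pvCategories.contains p then p else "Others"
        | none => "Others") [] (· ++ [diff]) := by
  cases o with
  | none => rfl
  | some s => by_cases hm : s ∈ pvCategories <;> simp [hm]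

theorem match_mem (o : Option String) :
    (match o with
      | some p => if pvCategories.contains p then p else "Others"
      | none => "Others")
      ∈ ["TissueSeg", "ImageInfo", "CellSeg", "QCInfo", "Stitch", "Register", "Others"] := by
  cases o with
  | none => simp
  | some p =>
    by_cases hm : p ∈ pvCategories
    · have hm' := hm
      simp only [pvCategories, List.mem_cons, List.not_mem_nil, or_false] at hm'
      rcases hm' with h | h | h | h | h | h <;> subst h <;> decide
    · simp [hm]

theorem stepA_eq (d : PySem.Dict String (List String)) (diff : String) :
    (let path_part :=
      if PySem.Str.startswith diff "[" && PySem.Str.isIn "]" diff then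
        PySem.Str.slice diff (some 1) (some (PySem.Str.find diff "]"))
      else diff
     let split_path := (PySem.Str.split? path_part ".").getD []
     match PySem.List.pyGet? split_path 1 with
     | some s =>
         if pvCategories.contains s then d.modify s [] (· ++ [diff])
         else d.modify "Others" [] (· ++ [diff])
     | none => d.modify "Others" [] (· ++ [diff]))
    = d.modify (category_of diff) [] (· ++ [diff]) := by
  unfold category_of
  exact match_step d diff _

theorem category_of_mem (diff : String) :
    category_of diff ∈ ["TissueSeg", "ImageInfo", "CellSeg", "QCInfo", "Stitch", "Register", "Others"] := by
  unfold category_of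
  exact match_mem _

-- ===== VERDICT (by name: the statement is the Claim_ definition above) =====
theorem categories_diff_spec : Claim_equal_categories_diff := by
  intro value_diffs _
  unfold Spec_categories_diff
  have hmain := foldl_modify_items category_of value_diffs
    [("TissueSeg", []), ("ImageInfo", []), ("CellSeg", []), ("QCInfo", []),
     ("Stitch", []), ("Register", []), ("Others", [])]
    (by decide)
    (fun x => by simpa using category_of_mem x)
  calc categories_diff value_diffs
      = (value_diffs.foldl (fun d x => PySem.Dict.modify d (category_of x) [] (· ++ [x]))
          (PySem.Dict.mk
            [("TissueSeg", []), ("ImageInfo", []), ("CellSeg", []), ("QCInfo", []),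
             ("Stitch", []), ("Register", []), ("Others", [])])).items := by
        simp only [categories_diff]
        have hinit :
            ((["TissueSeg", "ImageInfo", "CellSeg", "QCInfo", "Stitch", "Register"].foldl
              (fun d c => d.insert c ([] : List String)) PySem.Dict.empty).insert "Others" [])
            = PySem.Dict.mk
              [("TissueSeg", []), ("ImageInfo", []), ("CellSeg", []), ("QCInfo", []),
               ("Stitch", []), ("Register", []), ("Others", [])] := by decide
        rw [hinit]
        congr 1
        apply PySem.List.foldl_congr_mem
        intro d x _
        have := stepA_eq d x
        simpa [pvCategories] using this
    _ = _ := hmain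
    _ = categories_diff_alt value_diffs := by
        simp [categories_diff_alt, pvCategories]
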